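-- pv_equiv track=rewrite | github.com/falkdavid/advent-of-code | 2021/day11.py | handle_flashes
-- ===== SOURCE A (Python) =====
-- def iter_neighbor_cells(G, pos):
--     for x in range(pos[0]-1, pos[0]+2):
--         for y in range(pos[1]-1, pos[1]+2):
--             if (x, y) != pos and (x, y) in G.keys():
--                 yield (x, y)
--
-- def handle_flashes(G: dict):
--     flash = set()
--     while any([v > 9 for v in G.values()]):
--         for k,v in G.items():
--             if v > 9:
--                 flash.add(k)
--                 for kn in iter_neighbor_cells(G, k):
--                     if kn not in flash:
--                         G[kn] += 1
--                 G[k] = 0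
--     return len(flash)
-- ===== SOURCE B (Python) =====
-- def handle_flashes(G: dict):
--     # BFS over the flash cascade: seed the over-threshold cells, then process each
--     # flashing cell exactly once, pushing neighbors as they cross 9.
--     todo = [k for k, v in G.items() if v > 9]
--     flash = set(todo)
--     i = 0
--     while i < len(todo):
--         k = todo[i]
--         i += 1
--         x, y = k[0], k[1]
--         for dx in (-1, 0, 1):
--             for dy in (-1, 0, 1):
--                 n = (x + dx, y + dy)
--                 if n != k and n in G and n not in flash:
--                     G[n] += 1
--                     if G[n] > 9:
--                         flash.add(n)
--                         todo.append(n)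
--         G[k] = 0
--     return len(flash)
-- ===== Notes on version B (the rewrite author's own statement) =====
-- stated objective: alternative
-- what changed: A repeatedly rescans the whole grid (while any cell > 9, iterate over every cell) until no cell is over threshold; B seeds a worklist with the over-threshold cells and processes each flashing cell exactly once, pushing neighbors onto the list as they cross 9. Pre_ also requires pairwise-distinct keys, which every dict argument satisfies.
import Mathlib
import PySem

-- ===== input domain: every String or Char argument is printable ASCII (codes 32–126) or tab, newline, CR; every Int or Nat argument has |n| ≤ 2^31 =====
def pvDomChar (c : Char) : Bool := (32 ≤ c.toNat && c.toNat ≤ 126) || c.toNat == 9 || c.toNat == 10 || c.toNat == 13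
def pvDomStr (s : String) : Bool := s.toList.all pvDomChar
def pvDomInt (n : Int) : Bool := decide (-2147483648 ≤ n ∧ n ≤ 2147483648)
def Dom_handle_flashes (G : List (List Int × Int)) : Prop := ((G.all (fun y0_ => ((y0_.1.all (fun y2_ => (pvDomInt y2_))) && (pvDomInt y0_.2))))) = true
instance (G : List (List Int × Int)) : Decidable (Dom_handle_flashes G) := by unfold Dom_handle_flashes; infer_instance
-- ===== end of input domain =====

-- B replaces A's repeated full-grid rescan passes with a BFS-style worklist that processes each
-- flashing cell exactly once (objective: alternative algorithm; same return value).
-- Note: the Python A mutates its dict argument in place (flashed cells zeroed, neighbors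
-- incremented); B performs the same mutation; the equivalence proved here is about the return value.

-- ===== PORT A =====
def neighborsA (d : PySem.Dict (List Int) Int) (pos : List Int) : List (List Int) :=
  (PySem.List.pyRange (PySem.List.pyGetD pos 0 0 - 1) (PySem.List.pyGetD pos 0 0 + 2) 1).flatMap
    (fun x => (PySem.List.pyRange (PySem.List.pyGetD pos 1 0 - 1) (PySem.List.pyGetD pos 1 0 + 2) 1).filterMap
      (fun y => if [x, y] != pos && d.contains [x, y] then some [x, y] else none))

def flashStepA (st : PySem.Dict (List Int) Int × PySem.Set (List Int)) (k : List Int) :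
    PySem.Dict (List Int) Int × PySem.Set (List Int) :=
  if st.1.getD k 0 > 9 then
    let fl := PySem.Set.add st.2 k
    let d := (neighborsA st.1 k).foldl
      (fun d kn => if PySem.Set.contains fl kn then d else d.insert kn (d.getD kn 0 + 1)) st.1
    (d.insert k 0, fl)
  else st

def loopA (keys : List (List Int)) :
    Nat → PySem.Dict (List Int) Int × PySem.Set (List Int) →
    PySem.Dict (List Int) Int × PySem.Set (List Int)
  | 0, st => st
  | fuel+1, st =>
    if st.1.values.any (fun v => decide (9 < v)) then
      loopA keys fuel (keys.foldl flashStepA st)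
    else st

def handle_flashes (G : List (List Int × Int)) : Int :=
  let d := PySem.Dict.ofList G
  ((loopA d.keys (d.size + 1) (d, PySem.Set.empty)).2.length : Int)

-- ===== PORT B =====
def procB (k : List Int)
    (st : PySem.Dict (List Int) Int × PySem.Set (List Int) × List (List Int)) :
    PySem.Dict (List Int) Int × PySem.Set (List Int) × List (List Int) :=
  let x := PySem.List.pyGetD k 0 0
  let y := PySem.List.pyGetD k 1 0
  let st := [(-1 : Int), 0, 1].foldl (fun st dx =>
    [(-1 : Int), 0, 1].foldl (fun st dy =>
      let n := [x + dx, y + dy]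
      if n != k && st.1.contains n && !(PySem.Set.contains st.2.1 n) then
        let v := st.1.getD n 0 + 1
        let d := st.1.insert n v
        if v > 9 then (d, PySem.Set.add st.2.1 n, st.2.2 ++ [n]) else (d, st.2.1, st.2.2)
      else st) st) st
  (st.1.insert k 0, st.2.1, st.2.2)

def loopB :
    Nat → (PySem.Dict (List Int) Int × PySem.Set (List Int) × List (List Int)) → Nat →
    PySem.Dict (List Int) Int × PySem.Set (List Int) × List (List Int)
  | 0, st, _ => st
  | fuel+1, st, i =>
    if h : i < st.2.2.length then loopB fuel (procB st.2.2[i] st) (i+1) else st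

def handle_flashes_alt (G : List (List Int × Int)) : Int :=
  let d := PySem.Dict.ofList G
  let todo := d.items.filterMap (fun p => if p.2 > 9 then some p.1 else none)
  let fl : PySem.Set (List Int) := PySem.Set.ofList todo
  ((loopB d.size (d, fl, todo) 0).2.1.length : Int)

-- ===== PRECONDITION & SPEC =====
-- Pre_ excludes (a) inputs on which the Python A raises IndexError — a key of length < 2 whose
-- value is already over the flash threshold flashes and A then reads pos[0]/pos[1] — and
-- (b) association lists with duplicate keys, which do not encode a Python dict (a dict argument
-- always has pairwise-distinct keys).
def Pre_handle_flashes (G : List (List Int × Int)) : Prop :=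
  (G.map Prod.fst).Nodup ∧ ∀ p ∈ G, p.1.length < 2 → p.2 ≤ 9
instance (G : List (List Int × Int)) : Decidable (Pre_handle_flashes G) := by unfold Pre_handle_flashes; infer_instance
def pvWitness_handle_flashes : (List (List Int × Int)) := [([0,0], 10), ([0,1], 9), ([1,1], 3)]

def Spec_handle_flashes (G : List (List Int × Int)) (out : Int) : Prop := out = handle_flashes_alt G
instance (G : List (List Int × Int)) (out : Int) : Decidable (Spec_handle_flashes G out) := by unfold Spec_handle_flashes; infer_instance

-- ===== CLAIM (what is proved, stated in full; the proofs are below) =====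
def Claim_equal_handle_flashes : Prop := ∀ (G : List (List Int × Int)), Dom_handle_flashes G → Pre_handle_flashes G → Spec_handle_flashes G (handle_flashes G)

-- ===== LEMMAS AND PROOFS =====

-- abstract flash-cascade model shared by both proofs
def indeg (d0 : PySem.Dict (List Int) Int) (F : List (List Int)) (m : List Int) : Nat :=
  (F.filter (fun j => decide (m ∈ neighborsA d0 j))).length

def En (d0 : PySem.Dict (List Int) Int) (F : List (List Int)) (m : List Int) : Prop :=
  9 < d0.getD m 0 + indeg d0 F m

def SoundF (d0 : PySem.Dict (List Int) Int) (F : List (List Int)) : Prop :=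
  ∀ i (h : i < F.length), En d0 (F.take i) F[i]

def ClosedF (d0 : PySem.Dict (List Int) Int) (F : List (List Int)) : Prop :=
  ∀ m ∈ d0.keys, m ∉ F → ¬ En d0 F m

def GoodF (d0 : PySem.Dict (List Int) Int) (F : List (List Int)) : Prop :=
  F.Nodup ∧ (∀ x ∈ F, x ∈ d0.keys) ∧ SoundF d0 F

theorem indeg_nil (d0 : PySem.Dict (List Int) Int) (m : List Int) : indeg d0 [] m = 0 := rfl

theorem indeg_append (d0 : PySem.Dict (List Int) Int) (F : List (List Int)) (j m : List Int) :
    indeg d0 (F ++ [j]) m = indeg d0 F m + (if m ∈ neighborsA d0 j then 1 else 0) := by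
  simp [indeg, List.filter_append]; split_ifs <;> simp_all

theorem indeg_mono (d0 : PySem.Dict (List Int) Int) {F₁ F₂ : List (List Int)} (m : List Int)
    (h : F₁.Nodup) (hs : F₁ ⊆ F₂) : indeg d0 F₁ m ≤ indeg d0 F₂ m := by
  exact ((h.filter _).subperm (fun x hx => by
    simp only [List.mem_filter] at hx ⊢; exact ⟨hs hx.1, hx.2⟩)).length_le

theorem sound_append {d0 : PySem.Dict (List Int) Int} {F : List (List Int)} {k : List Int}
    (hS : SoundF d0 F) (hk : En d0 F k) : SoundF d0 (F ++ [k]) := by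
  intro i h
  rcases lt_or_ge i F.length with hi | hi
  · rw [List.getElem_append_left hi, List.take_append_of_le_length (by omega)]
    exact hS i hi
  · have : i = F.length := by simp at h; omega
    subst this
    simpa [List.take_append] using hk

theorem subset_of_good_closed {d0 : PySem.Dict (List Int) Int} {F₁ F₂ : List (List Int)}
    (h₁ : GoodF d0 F₁) (hc : ClosedF d0 F₂) : F₁ ⊆ F₂ := by
  obtain ⟨hnd, hsub, hS⟩ := h₁
  have main : ∀ i, ∀ x ∈ F₁.take i, x ∈ F₂ := by
    intro i
    induction i with
    | zero => simp
    | succ i ih =>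
      rcases lt_or_ge i F₁.length with hi | hi
      · intro x hx
        rw [List.take_add_one, List.getElem?_eq_getElem hi] at hx
        simp only [Option.toList_some, List.mem_append, List.mem_singleton] at hx
        rcases hx with hx | hx
        · exact ih x hx
        · subst hx
          by_contra hmem
          have hEn : En d0 F₂ F₁[i] := by
            have := hS i hi
            unfold En at this ⊢
            have := indeg_mono (F₁ := F₁.take i) (F₂ := F₂) d0 F₁[i]
              (hnd.sublist (List.take_sublist _ _)) (fun y hy => ih y hy)
            omega
          exact hc F₁[i] (hsub _ (List.getElem_mem hi)) hmem hEn
      · rw [List.take_of_length_le (by omega)]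
        rw [List.take_of_length_le hi] at ih; exact ih
  intro x hx
  exact main F₁.length x (by simpa using hx)

theorem length_eq_of_good_closed {d0 : PySem.Dict (List Int) Int} {F₁ F₂ : List (List Int)}
    (h₁ : GoodF d0 F₁) (hc₁ : ClosedF d0 F₁) (h₂ : GoodF d0 F₂) (hc₂ : ClosedF d0 F₂) :
    F₁.length = F₂.length :=
  le_antisymm
    ((h₁.1.subperm (subset_of_good_closed h₁ hc₂)).length_le)
    ((h₂.1.subperm (subset_of_good_closed h₂ hc₁)).length_le)

-- neighborsA facts
theorem range3 (a : Int) : PySem.List.pyRange (a - 1) (a + 2) 1 = [a - 1, a, a + 1] := by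
  rw [PySem.List.pyRange_one_cons (by omega), PySem.List.pyRange_one_cons (by omega),
      PySem.List.pyRange_one_cons (by omega), PySem.List.pyRange_one_eq_nil (by omega)]
  norm_num

def cands (k : List Int) : List (List Int) :=
  [(-1 : Int), 0, 1].flatMap (fun dx => [(-1 : Int), 0, 1].map
    (fun dy => [PySem.List.pyGetD k 0 0 + dx, PySem.List.pyGetD k 1 0 + dy]))

theorem cands_nodup (k : List Int) : (cands k).Nodup := by
  simp [cands, List.flatMap]

theorem filterMap_guard {α β : Type} (f : α → β) (p : β → Bool) (l : List α) :
    l.filterMap (fun a => if p (f a) then some (f a) else none) = (l.map f).filter p := by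
  induction l with
  | nil => rfl
  | cons a l ih =>
    simp only [List.filterMap_cons, List.map_cons, List.filter_cons]
    by_cases hp : p (f a) = true <;> simp [hp, ih]

theorem neighborsA_eq_filter (d : PySem.Dict (List Int) Int) (k : List Int) :
    neighborsA d k = (cands k).filter (fun m => m != k && d.contains m) := by
  unfold neighborsA cands
  rw [range3, range3]
  have h : ∀ a : Int, a + -1 = a - 1 := fun a => by ring
  have h0 : ∀ a : Int, a + 0 = a := fun a => by ring
  simp only [List.flatMap_cons, List.flatMap_nil, List.map_cons, List.map_nil,
    List.append_nil, List.filter_append,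
    filterMap_guard (fun y => [_, y]) (fun m => m != k && d.contains m), h, h0]

theorem mem_neighborsA_iff (d : PySem.Dict (List Int) Int) (k m : List Int) :
    m ∈ neighborsA d k ↔ m ∈ cands k ∧ m ≠ k ∧ d.contains m = true := by
  simp [neighborsA_eq_filter, List.mem_filter]

theorem neighborsA_nodup (d : PySem.Dict (List Int) Int) (k : List Int) :
    (neighborsA d k).Nodup := by
  rw [neighborsA_eq_filter]; exact (cands_nodup k).filter _

theorem neighborsA_keys_eq {d d0 : PySem.Dict (List Int) Int} (h : d.keys = d0.keys)
    (k : List Int) : neighborsA d k = neighborsA d0 k := by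
  rw [neighborsA_eq_filter, neighborsA_eq_filter]
  apply List.filter_congr
  intro m _
  rw [PySem.Dict.contains_eq_decide_mem_keys, PySem.Dict.contains_eq_decide_mem_keys, h]

theorem neighborsA_sub_keys (d : PySem.Dict (List Int) Int) (k m : List Int)
    (h : m ∈ neighborsA d k) : m ∈ d.keys := by
  rw [mem_neighborsA_iff] at h
  exact (PySem.Dict.contains_iff_mem_keys _ _).mp h.2.2

theorem size_eq_keys_length (d : PySem.Dict (List Int) Int) : d.size = d.keys.length := by
  simp [PySem.Dict.size, PySem.Dict.keys]


-- ===== Port A invariant =====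
def InvA (d0 : PySem.Dict (List Int) Int)
    (st : PySem.Dict (List Int) Int × PySem.Set (List Int)) : Prop :=
  st.1.keys = d0.keys ∧ st.2.Nodup ∧ (∀ x ∈ st.2, x ∈ d0.keys) ∧ SoundF d0 st.2 ∧
  (∀ m ∈ d0.keys, st.1.getD m 0 = if m ∈ st.2 then 0 else d0.getD m 0 + (indeg d0 st.2 m : Int))

theorem incFold_getD (fl : PySem.Set (List Int)) (ns : List (List Int)) :
    ∀ (d : PySem.Dict (List Int) Int), ns.Nodup → (∀ n ∈ ns, n ∈ d.keys) → ∀ (m : List Int),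
    ((ns.foldl (fun d kn => if PySem.Set.contains fl kn then d else d.insert kn (d.getD kn 0 + 1)) d).keys = d.keys ∧
     (ns.foldl (fun d kn => if PySem.Set.contains fl kn then d else d.insert kn (d.getD kn 0 + 1)) d).getD m 0
       = d.getD m 0 + (if m ∈ ns ∧ m ∉ fl then 1 else 0)) := by
  induction ns with
  | nil => intro d _ _ m; simp
  | cons n ns ih =>
    intro d hnd hsub m
    simp only [List.foldl_cons]
    by_cases hc : PySem.Set.contains fl n = true
    · rw [if_pos hc]
      obtain ⟨hk, hv⟩ := ih d hnd.of_cons (fun x hx => hsub x (List.mem_cons_of_mem _ hx)) m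
      refine ⟨hk, ?_⟩
      rw [hv]
      have hnfl : n ∈ fl := (PySem.Set.contains_iff _ _).mp hc
      by_cases hmn : m = n
      · subst hmn; simp [hnfl]
      · simp [List.mem_cons, hmn]
    · rw [if_neg hc]
      have hnk : n ∈ d.keys := hsub n List.mem_cons_self
      have hcont : d.contains n = true := (PySem.Dict.contains_iff_mem_keys _ _).mpr hnk
      have hkeys1 : (d.insert n (d.getD n 0 + 1)).keys = d.keys :=
        PySem.Dict.keys_insert_of_contains _ _ hcont
      obtain ⟨hk, hv⟩ := ih (d.insert n (d.getD n 0 + 1)) hnd.of_cons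
        (fun x hx => by rw [hkeys1]; exact hsub x (List.mem_cons_of_mem _ hx)) m
      refine ⟨by rw [hk, hkeys1], ?_⟩
      rw [hv, PySem.Dict.getD_insert]
      have hnfl : n ∉ fl := fun hm => hc ((PySem.Set.contains_iff _ _).mpr hm)
      by_cases hmn : m = n
      · subst hmn
        have : m ∉ ns := (List.nodup_cons.mp hnd).1
        simp [this, hnfl]
      · simp [List.mem_cons, hmn]

theorem flashStepA_inv {d0 : PySem.Dict (List Int) Int}
    {st : PySem.Dict (List Int) Int × PySem.Set (List Int)} (h : InvA d0 st)
    {k : List Int} (hk : k ∈ d0.keys) :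
    InvA d0 (flashStepA st k) ∧ ∃ t, (flashStepA st k).2 = st.2 ++ t := by
  obtain ⟨hkeys, hnd, hsub, hS, hval⟩ := h
  by_cases hguard : st.1.getD k 0 > 9
  · have hknot : k ∉ st.2 := by
      intro hmem
      have := hval k hk
      rw [if_pos hmem] at this
      omega
    have hfl : PySem.Set.add st.2 k = st.2 ++ [k] := PySem.Set.add_of_not_mem hknot
    have hnbeq : neighborsA st.1 k = neighborsA d0 k := neighborsA_keys_eq hkeys k
    have hEnk : En d0 st.2 k := by
      have := hval k hk
      rw [if_neg hknot] at this
      unfold En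
      omega
    have hnssub : ∀ n ∈ neighborsA st.1 k, n ∈ st.1.keys :=
      fun n hn => neighborsA_sub_keys _ _ _ hn
    set d' := (neighborsA st.1 k).foldl
      (fun d kn => if PySem.Set.contains (PySem.Set.add st.2 k) kn then d
        else d.insert kn (d.getD kn 0 + 1)) st.1 with hd'
    have hred : flashStepA st k = (d'.insert k 0, PySem.Set.add st.2 k) := by
      unfold flashStepA
      rw [if_pos hguard]
    have hfold := incFold_getD (PySem.Set.add st.2 k) (neighborsA st.1 k) st.1
      (neighborsA_nodup _ _) hnssub
    have hkcont : d'.contains k = true := by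
      rw [PySem.Dict.contains_eq_decide_mem_keys, (hfold k).1, hkeys]
      simp [hk]
    rw [hred]
    constructor
    · refine ⟨?_, ?_, ?_, ?_, ?_⟩
      · show (d'.insert k 0).keys = d0.keys
        rw [PySem.Dict.keys_insert_of_contains _ _ hkcont, (hfold k).1, hkeys]
      · show (PySem.Set.add st.2 k).Nodup
        rw [hfl]
        simp [List.nodup_append, hnd]
        exact fun a ha hak => hknot (hak ▸ ha)
      · intro x hx
        rw [hfl] at hx
        rcases List.mem_append.mp hx with hx | hx
        · exact hsub x hx
        · simp at hx; subst hx; exact hk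
      · show SoundF d0 (PySem.Set.add st.2 k)
        rw [hfl]
        exact sound_append hS hEnk
      · intro m hm
        show (d'.insert k 0).getD m 0 = if m ∈ PySem.Set.add st.2 k then 0
          else d0.getD m 0 + (indeg d0 (PySem.Set.add st.2 k) m : Int)
        rw [PySem.Dict.getD_insert]
        by_cases hmk : m = k
        · subst hmk
          rw [if_pos rfl, if_pos (by rw [hfl]; simp)]
        · rw [if_neg hmk, (hfold m).2, hval m hm]
          by_cases hmfl : m ∈ PySem.Set.add st.2 k
          · have hmfl2 : m ∈ st.2 := by
              rw [hfl] at hmfl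
              rcases List.mem_append.mp hmfl with h' | h'
              · exact h'
              · simp at h'; exact absurd h' hmk
            rw [if_pos hmfl2, if_pos hmfl, if_neg (by intro hh; exact hh.2 hmfl)]
            simp
          · have hmfl2 : m ∉ st.2 := by
              intro hh; exact hmfl (by rw [hfl]; exact List.mem_append_left _ hh)
            rw [if_neg hmfl2, if_neg hmfl, hfl, indeg_append, hnbeq]
            rw [hfl] at hmfl
            by_cases hnb : m ∈ neighborsA d0 k
            · rw [if_pos hnb, if_pos ⟨hnb, hfl ▸ hmfl⟩]
              push_cast
              ring
            · rw [if_neg hnb, if_neg (by intro hh; exact hnb hh.1)]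
              push_cast
              ring
    · exact ⟨[k], hfl⟩
  · have hred : flashStepA st k = st := by
      unfold flashStepA
      rw [if_neg hguard]
    rw [hred]
    exact ⟨⟨hkeys, hnd, hsub, hS, hval⟩, [], by simp⟩

theorem flashStepA_grow {d0 : PySem.Dict (List Int) Int}
    {st : PySem.Dict (List Int) Int × PySem.Set (List Int)} (h : InvA d0 st)
    {k : List Int} (hk : k ∈ d0.keys) (hguard : st.1.getD k 0 > 9) :
    (flashStepA st k).2 = st.2 ++ [k] := by
  have hknot : k ∉ st.2 := by
    intro hmem
    have := h.2.2.2.2 k hk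
    rw [if_pos hmem] at this
    omega
  have hred : (flashStepA st k).2 = PySem.Set.add st.2 k := by
    unfold flashStepA
    rw [if_pos hguard]
  rw [hred, PySem.Set.add_of_not_mem hknot]

theorem passA_inv {d0 : PySem.Dict (List Int) Int} (ks : List (List Int)) :
    ∀ st, (∀ x ∈ ks, x ∈ d0.keys) → InvA d0 st →
    InvA d0 (ks.foldl flashStepA st) ∧ ∃ t, (ks.foldl flashStepA st).2 = st.2 ++ t := by
  induction ks with
  | nil => exact fun st _ h => ⟨h, [], by simp⟩
  | cons k ks ih =>
    intro st hks h
    obtain ⟨h1, t1, ht1⟩ := flashStepA_inv h (hks k List.mem_cons_self)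
    obtain ⟨h2, t2, ht2⟩ := ih _ (fun x hx => hks x (List.mem_cons_of_mem _ hx)) h1
    refine ⟨by simpa using h2, t1 ++ t2, ?_⟩
    rw [List.foldl_cons, ht2, ht1, List.append_assoc]

theorem passA_progress {d0 : PySem.Dict (List Int) Int} (ks : List (List Int)) :
    ∀ st, (∀ x ∈ ks, x ∈ d0.keys) → InvA d0 st →
    (ks.foldl flashStepA st).2.length = st.2.length →
    ∀ k ∈ ks, ¬ 9 < st.1.getD k 0 := by
  induction ks with
  | nil => simp
  | cons k ks ih =>
    intro st hks h hlen
    by_cases hguard : st.1.getD k 0 > 9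
    · exfalso
      have hgrow := flashStepA_grow h (hks k List.mem_cons_self) hguard
      obtain ⟨h1, _⟩ := flashStepA_inv h (hks k List.mem_cons_self)
      obtain ⟨_, t, ht⟩ := passA_inv ks _ (fun x hx => hks x (List.mem_cons_of_mem _ hx)) h1
      rw [List.foldl_cons] at hlen
      rw [ht, hgrow] at hlen
      simp at hlen
    · have hstep : flashStepA st k = st := by
        unfold flashStepA
        rw [if_neg hguard]
      rw [List.foldl_cons, hstep] at hlen
      intro k' hk'
      rcases List.mem_cons.mp hk' with rfl | hk'
      · exact hguard
      · exact ih st (fun x hx => hks x (List.mem_cons_of_mem _ hx)) h hlen k' hk'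

theorem loopA_spec (d0 : PySem.Dict (List Int) Int) (hnd0 : d0.keys.Nodup) :
    ∀ (fuel : Nat) (st : PySem.Dict (List Int) Int × PySem.Set (List Int)),
    InvA d0 st → d0.keys.length + 1 ≤ fuel + st.2.length →
    InvA d0 (loopA d0.keys fuel st) ∧ ClosedF d0 (loopA d0.keys fuel st).2 := by
  intro fuel
  induction fuel with
  | zero =>
    intro st h hle
    exfalso
    have := (h.2.1.subperm (fun x hx => h.2.2.1 x hx)).length_le
    have : st.2.length ≤ (d0.keys.map id).length := by simpa using this
    simp at this
    omega
  | succ fuel ih =>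
    intro st h hle
    simp only [loopA]
    by_cases hcond : st.1.values.any (fun v => decide (9 < v)) = true
    · rw [if_pos hcond]
      obtain ⟨h1, t, ht⟩ := passA_inv d0.keys st (fun x hx => hx) h
      have hwit : ∃ m ∈ d0.keys, 9 < st.1.getD m 0 := by
        rw [List.any_eq_true] at hcond
        obtain ⟨v, hv, h9⟩ := hcond
        rw [PySem.Dict.values_eq_map_keys st.1 (h.1 ▸ hnd0) 0] at hv
        obtain ⟨m, hm, hmv⟩ := List.mem_map.mp hv
        exact ⟨m, h.1 ▸ hm, by rw [hmv]; exact of_decide_eq_true h9⟩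
      have hgrow : st.2.length < (d0.keys.foldl flashStepA st).2.length := by
        rcases Nat.lt_or_ge st.2.length (d0.keys.foldl flashStepA st).2.length with hlt | hge
        · exact hlt
        · exfalso
          have hlen : (d0.keys.foldl flashStepA st).2.length = st.2.length := by
            rw [ht]; rw [ht] at hge; simp at hge ⊢; omega
          obtain ⟨m, hm, h9⟩ := hwit
          exact passA_progress d0.keys st (fun x hx => hx) h hlen m hm h9
      exact ih _ h1 (by omega)
    · rw [if_neg hcond]
      refine ⟨h, ?_⟩
      intro m hm hnotin hEn
      have hvle : st.1.getD m 0 ≤ 9 := by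
        by_contra h9
        apply hcond
        rw [List.any_eq_true]
        refine ⟨st.1.getD m 0, ?_, by simp; omega⟩
        rw [PySem.Dict.values_eq_map_keys st.1 (h.1 ▸ hnd0) 0]
        exact List.mem_map.mpr ⟨m, h.1 ▸ hm, rfl⟩
      have := h.2.2.2.2 m hm
      rw [if_neg hnotin] at this
      unfold En at hEn
      omega

theorem A_char (G : List (List Int × Int)) :
    ∃ F, GoodF (PySem.Dict.ofList G) F ∧ ClosedF (PySem.Dict.ofList G) F ∧
      handle_flashes G = (F.length : Int) := by
  have hnd0 := PySem.Dict.nodup_keys_ofList G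
  have hinv : InvA (PySem.Dict.ofList G) (PySem.Dict.ofList G, PySem.Set.empty) := by
    refine ⟨rfl, List.nodup_nil, by simp [PySem.Set.empty], ?_, ?_⟩
    · intro i hi
      simp [PySem.Set.empty] at hi
    · intro m hm
      simp [PySem.Set.empty, indeg_nil]
  obtain ⟨hfin, hcl⟩ := loopA_spec (PySem.Dict.ofList G) hnd0 ((PySem.Dict.ofList G).size + 1)
    (PySem.Dict.ofList G, PySem.Set.empty) hinv
    (by rw [size_eq_keys_length]; simp [PySem.Set.empty])
  exact ⟨_, ⟨hfin.2.1, hfin.2.2.1, hfin.2.2.2.1⟩, hcl, rfl⟩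

-- ===== Port B invariant =====
def condStep (k : List Int)
    (st : PySem.Dict (List Int) Int × PySem.Set (List Int) × List (List Int))
    (n : List Int) :
    PySem.Dict (List Int) Int × PySem.Set (List Int) × List (List Int) :=
  if n != k && st.1.contains n && !(PySem.Set.contains st.2.1 n) then
    let v := st.1.getD n 0 + 1
    let d := st.1.insert n v
    if v > 9 then (d, PySem.Set.add st.2.1 n, st.2.2 ++ [n]) else (d, st.2.1, st.2.2)
  else st

set_option maxHeartbeats 1000000 in
theorem procB_eq (k : List Int)
    (st : PySem.Dict (List Int) Int × PySem.Set (List Int) × List (List Int)) :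
    procB k st =
      ((((cands k).foldl (condStep k) st).1.insert k 0),
        ((cands k).foldl (condStep k) st).2.1, ((cands k).foldl (condStep k) st).2.2) := rfl

def MInvB (d0 : PySem.Dict (List Int) Int) (k : List Int) (P : List (List Int))
    (done : List (List Int))
    (st : PySem.Dict (List Int) Int × PySem.Set (List Int) × List (List Int)) : Prop :=
  st.1.keys = d0.keys ∧ st.2.2 = st.2.1 ∧ st.2.1.Nodup ∧ (∀ x ∈ st.2.1, x ∈ d0.keys) ∧
  SoundF d0 st.2.1 ∧ (∀ x ∈ P ++ [k], x ∈ st.2.1) ∧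
  (∀ m ∈ d0.keys, m ∉ st.2.1 →
    st.1.getD m 0 = d0.getD m 0 + (indeg d0 P m : Int) + (if m ∈ done ∧ m ≠ k then 1 else 0) ∧
    st.1.getD m 0 ≤ 9)

theorem condFold_inv (d0 : PySem.Dict (List Int) Int) (k : List Int) (P : List (List Int))
    (hPnd : (P ++ [k]).Nodup) (cs : List (List Int)) :
    ∀ (done : List (List Int)), cands k = done ++ cs →
    ∀ st, MInvB d0 k P done st →
    MInvB d0 k P (done ++ cs) (cs.foldl (condStep k) st) ∧
      ∃ t, (cs.foldl (condStep k) st).2.1 = st.2.1 ++ t := by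
  induction cs with
  | nil => exact fun done _ st h => ⟨by simpa using h, [], by simp⟩
  | cons n cs ih =>
    intro done hsplit st h
    obtain ⟨hkeys, htd, hnd, hsub, hS, hPsub, hval⟩ := h
    have hcnodup := cands_nodup k
    rw [hsplit] at hcnodup
    have hndone : n ∉ done := fun hmem =>
      (List.disjoint_of_nodup_append hcnodup) hmem List.mem_cons_self
    have hstep : MInvB d0 k P (done ++ [n]) (condStep k st n) ∧
        ∃ t, (condStep k st n).2.1 = st.2.1 ++ t := by
      by_cases hg : (n != k && st.1.contains n && !(PySem.Set.contains st.2.1 n)) = true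
      · simp only [Bool.and_eq_true, bne_iff_ne, Bool.not_eq_true'] at hg
        obtain ⟨⟨hnk, hcont⟩, hflc⟩ := hg
        have hnfl : n ∉ st.2.1 := fun hmem => by
          rw [(PySem.Set.contains_iff _ _).mpr hmem] at hflc
          exact Bool.true_eq_false.mp hflc
        have hnK : n ∈ d0.keys := by
          rw [PySem.Dict.contains_eq_decide_mem_keys, hkeys] at hcont
          exact of_decide_eq_true hcont
        obtain ⟨hvn, hvn9⟩ := hval n hnK hnfl
        have hcnt0 : (if n ∈ done ∧ n ≠ k then (1:Int) else 0) = 0 := by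
          rw [if_neg (fun hh => hndone hh.1)]
        have hnnb : n ∈ neighborsA d0 k := by
          rw [mem_neighborsA_iff]
          refine ⟨by rw [hsplit]; exact List.mem_append_right _ List.mem_cons_self, hnk, ?_⟩
          rw [PySem.Dict.contains_eq_decide_mem_keys]
          simp [hnK]
        have hguard : (n != k && st.1.contains n && !(PySem.Set.contains st.2.1 n)) = true := by
          simp only [Bool.and_eq_true, bne_iff_ne, Bool.not_eq_true']
          refine ⟨⟨hnk, hcont⟩, ?_⟩
          rw [← Bool.not_eq_true]
          intro hc
          exact hnfl ((PySem.Set.contains_iff _ _).mp hc)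
        have hkeys1 : (st.1.insert n (st.1.getD n 0 + 1)).keys = d0.keys := by
          rw [PySem.Dict.keys_insert_of_contains _ _ hcont, hkeys]
        by_cases hv9 : st.1.getD n 0 + 1 > 9
        · have hred : condStep k st n =
              (st.1.insert n (st.1.getD n 0 + 1), PySem.Set.add st.2.1 n, st.2.2 ++ [n]) := by
            unfold condStep
            rw [if_pos hguard, if_pos hv9]
          have hfl : PySem.Set.add st.2.1 n = st.2.1 ++ [n] := PySem.Set.add_of_not_mem hnfl
          have hEnn : En d0 st.2.1 n := by
            have hsubPk : (P ++ [k]) ⊆ st.2.1 := fun x hx => hPsub x hx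
            have hmono := indeg_mono (F₁ := P ++ [k]) (F₂ := st.2.1) d0 n hPnd hsubPk
            rw [indeg_append, if_pos hnnb] at hmono
            unfold En
            rw [hcnt0] at hvn
            omega
          rw [hred]
          refine ⟨⟨hkeys1, ?_, ?_, ?_, ?_, ?_, ?_⟩, ?_⟩
          · show st.2.2 ++ [n] = PySem.Set.add st.2.1 n
            rw [hfl, htd]
          · show (PySem.Set.add st.2.1 n).Nodup
            rw [hfl]
            simp [List.nodup_append, hnd]
            exact fun a ha han => hnfl (han ▸ ha)
          · intro x hx
            rw [hfl] at hx
            rcases List.mem_append.mp hx with hx | hx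
            · exact hsub x hx
            · simp at hx; subst hx; exact hnK
          · show SoundF d0 (PySem.Set.add st.2.1 n)
            rw [hfl]
            exact sound_append hS hEnn
          · intro x hx
            rw [hfl]
            exact List.mem_append_left _ (hPsub x hx)
          · intro m hm hmfl
            rw [hfl] at hmfl
            have hmn : m ≠ n := fun hh => hmfl (hh ▸ List.mem_append_right _ List.mem_cons_self)
            have hmfl2 : m ∉ st.2.1 := fun hh => hmfl (List.mem_append_left _ hh)
            obtain ⟨hv, hle⟩ := hval m hm hmfl2
            rw [PySem.Dict.getD_insert, if_neg hmn]
            refine ⟨?_, hle⟩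
            rw [hv]
            congr 1
            by_cases hmdone : m ∈ done ∧ m ≠ k
            · rw [if_pos hmdone, if_pos ⟨List.mem_append_left _ hmdone.1, hmdone.2⟩]
            · rw [if_neg hmdone, if_neg (fun hh => hmdone ⟨?_, hh.2⟩)]
              rcases List.mem_append.mp hh.1 with h' | h'
              · exact h'
              · simp at h'; exact absurd h' hmn
          · exact ⟨[n], hfl⟩
        · have hred : condStep k st n =
              (st.1.insert n (st.1.getD n 0 + 1), st.2.1, st.2.2) := by
            unfold condStep
            rw [if_pos hguard, if_neg hv9]
          rw [hred]
          refine ⟨⟨hkeys1, htd, hnd, hsub, hS, hPsub, ?_⟩, [], by simp⟩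
          intro m hm hmfl
          rw [PySem.Dict.getD_insert]
          by_cases hmn : m = n
          · subst hmn
            rw [if_pos rfl]
            constructor
            · rw [hvn, hcnt0, if_pos ⟨List.mem_append_right _ List.mem_cons_self, hnk⟩]
              ring
            · omega
          · rw [if_neg hmn]
            obtain ⟨hv, hle⟩ := hval m hm hmfl
            refine ⟨?_, hle⟩
            rw [hv]
            congr 1
            by_cases hmdone : m ∈ done ∧ m ≠ k
            · rw [if_pos hmdone, if_pos ⟨List.mem_append_left _ hmdone.1, hmdone.2⟩]
            · rw [if_neg hmdone, if_neg (fun hh => hmdone ⟨?_, hh.2⟩)]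
              rcases List.mem_append.mp hh.1 with h' | h'
              · exact h'
              · simp at h'; exact absurd h' hmn
      · have hred : condStep k st n = st := by
          unfold condStep
          rw [if_neg hg]
        rw [hred]
        refine ⟨⟨hkeys, htd, hnd, hsub, hS, hPsub, ?_⟩, [], by simp⟩
        intro m hm hmfl
        obtain ⟨hv, hle⟩ := hval m hm hmfl
        refine ⟨?_, hle⟩
        rw [hv]
        congr 1
        by_cases hmn : m = n
        · subst hmn
          by_cases hmk : m = k
          · rw [if_neg (fun hh => hh.2 hmk), if_neg (fun hh => hh.2 hmk)]
          · exfalso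
            apply hg
            simp only [Bool.and_eq_true, bne_iff_ne, Bool.not_eq_true']
            refine ⟨⟨hmk, ?_⟩, ?_⟩
            · rw [PySem.Dict.contains_eq_decide_mem_keys, hkeys]
              simp [hm]
            · rw [← Bool.not_eq_true]
              intro hc
              exact hmfl ((PySem.Set.contains_iff _ _).mp hc)
        · by_cases hmdone : m ∈ done ∧ m ≠ k
          · rw [if_pos hmdone, if_pos ⟨List.mem_append_left _ hmdone.1, hmdone.2⟩]
          · rw [if_neg hmdone, if_neg (fun hh => hmdone ⟨?_, hh.2⟩)]
            rcases List.mem_append.mp hh.1 with h' | h'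
            · exact h'
            · simp at h'; exact absurd h' hmn
    obtain ⟨h1, t1, ht1⟩ := hstep
    obtain ⟨h2, t2, ht2⟩ := ih (done ++ [n]) (by rw [hsplit]; simp) _ h1
    refine ⟨by simpa using h2, t1 ++ t2, ?_⟩
    rw [List.foldl_cons, ht2, ht1, List.append_assoc]

def InvB (d0 : PySem.Dict (List Int) Int)
    (st : PySem.Dict (List Int) Int × PySem.Set (List Int) × List (List Int)) (i : Nat) : Prop :=
  st.1.keys = d0.keys ∧ st.2.2 = st.2.1 ∧ st.2.1.Nodup ∧ (∀ x ∈ st.2.1, x ∈ d0.keys) ∧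
  SoundF d0 st.2.1 ∧ i ≤ st.2.1.length ∧
  (∀ m ∈ d0.keys, m ∉ st.2.1 →
    st.1.getD m 0 = d0.getD m 0 + (indeg d0 (st.2.1.take i) m : Int) ∧ st.1.getD m 0 ≤ 9)

theorem procB_inv {d0 : PySem.Dict (List Int) Int}
    {st : PySem.Dict (List Int) Int × PySem.Set (List Int) × List (List Int)} {i : Nat}
    (h : InvB d0 st i) (hi : i < st.2.2.length) :
    InvB d0 (procB (st.2.2[i]'hi) st) (i + 1) ∧
      ∃ t, (procB (st.2.2[i]'hi) st).2.1 = st.2.1 ++ t := by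
  obtain ⟨hkeys, htd, hnd, hsub, hS, hile, hval⟩ := h
  have hi' : i < st.2.1.length := by rw [← htd]; exact hi
  set k := st.2.2[i]'hi with hkdef
  have hkeq : k = st.2.1[i]'hi' := by
    rw [hkdef]
    exact List.getElem_of_eq htd hi
  have hkmem : k ∈ st.2.1 := by
    rw [hkeq]
    exact List.getElem_mem hi'
  have htake : st.2.1.take (i+1) = st.2.1.take i ++ [k] := by
    rw [List.take_add_one, List.getElem?_eq_getElem hi']
    simp [hkeq]
  have hPnd : (st.2.1.take i ++ [k]).Nodup := by
    rw [← htake]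
    exact hnd.sublist (List.take_sublist _ _)
  have hPsub : ∀ x ∈ st.2.1.take i ++ [k], x ∈ st.2.1 := by
    rw [← htake]
    exact fun x hx => (List.take_sublist _ _).subset hx
  have hM0 : MInvB d0 k (st.2.1.take i) [] st := by
    refine ⟨hkeys, htd, hnd, hsub, hS, hPsub, ?_⟩
    intro m hm hmfl
    obtain ⟨hv, hle⟩ := hval m hm hmfl
    exact ⟨by rw [hv, if_neg (by simp)]; ring, hle⟩
  obtain ⟨hM, t, ht⟩ := condFold_inv d0 k (st.2.1.take i) hPnd (cands k) [] rfl st hM0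
  obtain ⟨hkeysf, htdf, hndf, hsubf, hSf, hPsubf, hvalf⟩ := hM
  set stf := (cands k).foldl (condStep k) st with hstf
  have hkK : k ∈ d0.keys := hsub k hkmem
  have hkcontf : stf.1.contains k = true := by
    rw [PySem.Dict.contains_eq_decide_mem_keys, hkeysf]
    simp [hkK]
  rw [procB_eq]
  refine ⟨⟨?_, htdf, hndf, hsubf, hSf, ?_, ?_⟩, ⟨t, ht⟩⟩
  · show (stf.1.insert k 0).keys = d0.keys
    rw [PySem.Dict.keys_insert_of_contains _ _ hkcontf, hkeysf]
  · show i + 1 ≤ stf.2.1.length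
    rw [ht]
    simp
    omega
  · intro m hm hmfl
    have hmfl' : m ∉ stf.2.1 := hmfl
    have hkf : k ∈ stf.2.1 := hPsubf k (List.mem_append_right _ List.mem_cons_self)
    have hmk : m ≠ k := fun hh => hmfl' (hh ▸ hkf)
    obtain ⟨hv, hle⟩ := hvalf m hm hmfl'
    have hgetD : (stf.1.insert k 0).getD m 0 = stf.1.getD m 0 := by
      rw [PySem.Dict.getD_insert, if_neg hmk]
    refine ⟨?_, by rw [hgetD]; exact hle⟩
    show (stf.1.insert k 0).getD m 0 = d0.getD m 0 + (indeg d0 (stf.2.1.take (i+1)) m : Int)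
    have htakef : stf.2.1.take (i+1) = st.2.1.take i ++ [k] := by
      rw [ht, List.take_append_of_le_length (by omega), htake]
    rw [hgetD, hv, htakef, indeg_append]
    have hcnt : (if m ∈ [] ++ cands k ∧ m ≠ k then (1:Int) else 0)
        = if m ∈ neighborsA d0 k then (1:Int) else 0 := by
      by_cases hnb : m ∈ neighborsA d0 k
      · rw [if_pos hnb]
        rw [mem_neighborsA_iff] at hnb
        rw [if_pos ⟨by simpa using hnb.1, hnb.2.1⟩]
      · rw [if_neg hnb, if_neg ?_]
        intro hh
        apply hnb
        rw [mem_neighborsA_iff]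
        refine ⟨by simpa using hh.1, hh.2, ?_⟩
        rw [PySem.Dict.contains_eq_decide_mem_keys]
        simp [hm]
    rw [hcnt]
    by_cases hnb : m ∈ neighborsA d0 k
    · rw [if_pos hnb, if_pos hnb]
      push_cast
      ring
    · rw [if_neg hnb, if_neg hnb]
      push_cast
      ring

theorem InvB_exit {d0 : PySem.Dict (List Int) Int}
    {st : PySem.Dict (List Int) Int × PySem.Set (List Int) × List (List Int)} {i : Nat}
    (h : InvB d0 st i) (hge : st.2.2.length ≤ i) :
    GoodF d0 st.2.1 ∧ ClosedF d0 st.2.1 := by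
  obtain ⟨hkeys, htd, hnd, hsub, hS, hile, hval⟩ := h
  refine ⟨⟨hnd, hsub, hS⟩, ?_⟩
  intro m hm hmfl hEn
  have hlen : st.2.1.length ≤ i := by rw [← htd]; exact hge
  have htk : st.2.1.take i = st.2.1 := List.take_of_length_le hlen
  obtain ⟨hv, hle⟩ := hval m hm hmfl
  rw [htk] at hv
  unfold En at hEn
  omega

theorem loopB_spec (d0 : PySem.Dict (List Int) Int) :
    ∀ (fuel : Nat) (st : PySem.Dict (List Int) Int × PySem.Set (List Int) × List (List Int))
      (i : Nat), InvB d0 st i → d0.keys.length ≤ fuel + i →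
    GoodF d0 (loopB fuel st i).2.1 ∧ ClosedF d0 (loopB fuel st i).2.1 := by
  intro fuel
  induction fuel with
  | zero =>
    intro st i h hle
    have hfl : st.2.1.length ≤ d0.keys.length := (h.2.2.1.subperm h.2.2.2.1).length_le
    have hge : st.2.2.length ≤ i := by
      rw [h.2.1]
      omega
    exact InvB_exit h hge
  | succ fuel ih =>
    intro st i h hle
    simp only [loopB]
    by_cases hi : i < st.2.2.length
    · rw [dif_pos hi]
      obtain ⟨h1, _⟩ := procB_inv h hi
      exact ih _ _ h1 (by omega)
    · rw [dif_neg hi]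
      exact InvB_exit h (by omega)

theorem filterMap_if_fst (l : List ((List Int) × Int)) :
    l.filterMap (fun p => if p.2 > 9 then some p.1 else none)
      = (l.filter (fun p => decide (9 < p.2))).map Prod.fst := by
  induction l with
  | nil => rfl
  | cons p l ih =>
    by_cases h : p.2 > 9 <;> simp [h, ih]

theorem B_char (G : List (List Int × Int)) :
    ∃ F, GoodF (PySem.Dict.ofList G) F ∧ ClosedF (PySem.Dict.ofList G) F ∧
      handle_flashes_alt G = (F.length : Int) := by
  have hndk := PySem.Dict.nodup_keys_ofList G
  set d0 := PySem.Dict.ofList G with hd0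
  set todo := d0.items.filterMap (fun p => if p.2 > 9 then some p.1 else none) with htodo
  have hseeds : todo = (d0.items.filter (fun p => decide (9 < p.2))).map Prod.fst :=
    filterMap_if_fst _
  have hkeysdef : d0.keys = d0.items.map Prod.fst := rfl
  have hsl : todo.Sublist d0.keys := by
    rw [hseeds, hkeysdef]
    exact List.Sublist.map Prod.fst List.filter_sublist
  have hndt : todo.Nodup := hndk.sublist hsl
  have hfl : PySem.Set.ofList todo = todo := PySem.Set.ofList_eq_self_of_nodup _ hndt
  have hmemval : ∀ x ∈ todo, 9 < d0.getD x 0 := by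
    intro x hx
    rw [hseeds] at hx
    obtain ⟨p, hp, hpx⟩ := List.mem_map.mp hx
    rw [List.mem_filter] at hp
    have : (x, p.2) ∈ d0.items := by
      rw [← hpx]
      exact hp.1
    rw [PySem.Dict.getD_of_mem_items _ this hndk]
    exact of_decide_eq_true hp.2
  have hnotval : ∀ m ∈ d0.keys, m ∉ todo → d0.getD m 0 ≤ 9 := by
    intro m hm hmt
    rw [hkeysdef] at hm
    obtain ⟨p, hp, hpm⟩ := List.mem_map.mp hm
    have hgd : d0.getD m 0 = p.2 := by
      have : (m, p.2) ∈ d0.items := by rw [← hpm]; exact hp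
      rw [PySem.Dict.getD_of_mem_items _ this hndk]
    by_contra h9
    apply hmt
    rw [hseeds]
    refine List.mem_map.mpr ⟨p, List.mem_filter.mpr ⟨hp, ?_⟩, hpm⟩
    simp
    omega
  have hinv0 : InvB d0 (d0, todo, todo) 0 := by
    refine ⟨rfl, rfl, hndt, fun x hx => hsl.subset hx, ?_, by simp, ?_⟩
    · intro j hj
      have hj' : j < todo.length := by simpa using hj
      have h9 : 9 < d0.getD (todo[j]'hj') 0 := hmemval _ (List.getElem_mem hj')
      have hnn : 0 ≤ (indeg d0 (todo.take j) (todo[j]'hj') : Int) := by positivity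
      have hEn : En d0 (todo.take j) (todo[j]'hj') := by unfold En; omega
      exact hEn
    · intro m hm hmfl
      exact ⟨by simp [indeg_nil], hnotval m hm hmfl⟩
  have hinv : InvB d0 (d0, PySem.Set.ofList todo, todo) 0 := by
    rw [hfl]
    exact hinv0
  obtain ⟨hG, hC⟩ := loopB_spec d0 d0.size (d0, PySem.Set.ofList todo, todo) 0 hinv
    (by rw [size_eq_keys_length]; omega)
  exact ⟨_, hG, hC, rfl⟩

theorem AB_eq (G : List (List Int × Int)) : handle_flashes G = handle_flashes_alt G := by
  obtain ⟨F₁, hG₁, hC₁, hE₁⟩ := A_char G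
  obtain ⟨F₂, hG₂, hC₂, hE₂⟩ := B_char G
  rw [hE₁, hE₂, length_eq_of_good_closed hG₁ hC₁ hG₂ hC₂]

-- ===== VERDICT =====
theorem handle_flashes_spec : Claim_equal_handle_flashes := by
  intro G _ _
  exact AB_eq G
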